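-- pv_equiv track=rewrite | github.com/PowerInterest/HillsInspector | src/services/vision_service.py | _append_missing_braces
-- ===== SOURCE A (Python) =====
-- def _append_missing_braces(text: str) -> str:
--     in_string = False
--     escape = False
--     depth = 0
--     for ch in text:
--         if in_string:
--             if escape:
--                 escape = False
--             elif ch == "\\":
--                 escape = True
--             elif ch == '"':
--                 in_string = False
--             continue
--         if ch == '"':
--             in_string = True
--             continue
--         if ch == "{":
--             depth += 1
--         elif ch == "}":
--             depth = max(depth - 1, 0)
--     if depth > 0:
--         return text + ("}" * depth)
--     return text
-- ===== SOURCE B (Python) =====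
-- def _strip_strings(text: str) -> str:
--     # two-pass decomposition: remove quoted string literals (with escape
--     # handling; an unterminated string swallows the rest), keep the rest
--     out = []
--     i = 0
--     n = len(text)
--     while i < n:
--         ch = text[i]
--         if ch == '"':
--             i += 1
--             while i < n:
--                 if text[i] == '\\':
--                     i += 2
--                 elif text[i] == '"':
--                     i += 1
--                     break
--                 else:
--                     i += 1
--         else:
--             out.append(ch)
--             i += 1
--     return ''.join(out)
--
--
-- def _append_missing_braces(text: str) -> str:
--     depth = 0
--     for ch in _strip_strings(text):
--         if ch == '{':
--             depth += 1
--         elif ch == '}':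
--             depth = max(depth - 1, 0)
--     return text + '}' * depth if depth > 0 else text
-- ===== Notes on version B (the rewrite author's own statement) =====
-- stated objective: alternative
-- what changed: A's single fused scan with in_string/escape flags is replaced by a two-pass decomposition: first strip quoted string literals (an index-based skip of each literal, with escapes; an unterminated string swallows the rest), then a plain clamped brace count over the stripped text.
import Mathlib
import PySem

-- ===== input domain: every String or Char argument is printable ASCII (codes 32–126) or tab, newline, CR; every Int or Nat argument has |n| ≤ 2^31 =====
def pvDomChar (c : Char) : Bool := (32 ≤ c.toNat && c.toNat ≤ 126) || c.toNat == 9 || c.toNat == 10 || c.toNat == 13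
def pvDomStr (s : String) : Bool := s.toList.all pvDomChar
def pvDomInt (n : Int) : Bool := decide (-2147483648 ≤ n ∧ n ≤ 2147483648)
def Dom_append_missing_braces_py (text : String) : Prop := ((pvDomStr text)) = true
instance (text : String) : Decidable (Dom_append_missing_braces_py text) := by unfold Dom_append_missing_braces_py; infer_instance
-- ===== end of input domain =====

-- B replaces A's fused scan (in_string/escape flags) with a two-pass decomposition:
-- first strip quoted string literals, then count unmatched '{' over the stripped text.

-- ===== PORT A =====
-- A's loop state: (in_string, escape, depth)
def pvAStep (st : Bool × Bool × Int) (ch : Char) : Bool × Bool × Int :=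
  let (inStr, escape, depth) := st
  if inStr then
    if escape then (inStr, false, depth)
    else if ch = '\\' then (inStr, true, depth)
    else if ch = '"' then (false, escape, depth)
    else st
  else if ch = '"' then (true, escape, depth)
  else if ch = '{' then (inStr, escape, depth + 1)
  else if ch = '}' then (inStr, escape, max (depth - 1) 0)
  else st

def append_missing_braces_py (text : String) : String :=
  let depth := (text.toList.foldl pvAStep (false, false, 0)).2.2
  if depth > 0 then text ++ String.ofList (List.replicate depth.toNat '}') else text

-- ===== PORT B =====
-- skip to (just past) the closing quote of a string literal; '\' consumes the next char
def pvSkipStr : List Char → List Char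
  | [] => []
  | c :: rest =>
    if c = '\\' then pvSkipStr (rest.drop 1)
    else if c = '"' then rest
    else pvSkipStr rest
termination_by l => l.length
decreasing_by
  · simp
  · simp

-- B's first pass: remove string literals
lemma pvStripLen : ∀ l : List Char, (pvSkipStr l).length ≤ l.length := by
  intro l
  induction l using pvSkipStr.induct with
  | case1 => simp [pvSkipStr]
  | _ => first
    | (simp_all [pvSkipStr]; omega)
    | simp_all [pvSkipStr]

def pvStrip : List Char → List Char
  | [] => []
  | c :: rest =>
    if c = '"' then pvStrip (pvSkipStr rest)
    else c :: pvStrip rest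
termination_by l => l.length
decreasing_by
  · have := pvStripLen rest; simp; omega
  · simp

-- B's second pass: depth counting with the clamp
def pvBStep (d : Int) (ch : Char) : Int :=
  if ch = '{' then d + 1 else if ch = '}' then max (d - 1) 0 else d

def append_missing_braces_py_alt (text : String) : String :=
  let depth := (pvStrip text.toList).foldl pvBStep 0
  if depth > 0 then text ++ String.ofList (List.replicate depth.toNat '}') else text

-- ===== PRECONDITION & SPEC =====
def Spec_append_missing_braces_py (text : String) (out : String) : Prop := out = append_missing_braces_py_alt text
instance (text : String) (out : String) : Decidable (Spec_append_missing_braces_py text out) := by unfold Spec_append_missing_braces_py; infer_instance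

-- ===== CLAIM (what is proved, stated in full; the proofs are below) =====
def Claim_equal_append_missing_braces_py : Prop := ∀ (text : String), Dom_append_missing_braces_py text → Spec_append_missing_braces_py text (append_missing_braces_py text)

-- ===== LEMMAS AND PROOFS =====
-- main invariant: A's scan depth equals B's count of the stripped text,
-- both from "outside a string" (P) and from "inside a string, no escape" (Q)
lemma pv_main : ∀ (n : Nat) (l : List Char), l.length ≤ n →
    (∀ d : Int, (l.foldl pvAStep (false, false, d)).2.2 = (pvStrip l).foldl pvBStep d) ∧
    (∀ d : Int, (l.foldl pvAStep (true, false, d)).2.2 = (pvStrip (pvSkipStr l)).foldl pvBStep d) := by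
  intro n
  induction n with
  | zero =>
    intro l hl
    have : l = [] := by cases l <;> simp_all
    subst this
    simp [pvStrip, pvSkipStr]
  | succ n ih =>
    intro l hl
    cases l with
    | nil => simp [pvStrip, pvSkipStr]
    | cons c rest =>
      have hrest : rest.length ≤ n := by simp at hl; omega
      constructor
      · intro d
        by_cases hq : c = '"'
        · subst hq
          simp only [List.foldl_cons, pvAStep, pvStrip]
          simpa using (ih rest hrest).2 d
        · simp only [List.foldl_cons, pvAStep, pvStrip, if_neg hq]
          by_cases ho : c = '{'
          · simp only [pvBStep, if_pos ho]
            exact (ih rest hrest).1 (d + 1)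
          · by_cases hc : c = '}'
            · simp only [pvBStep, if_neg ho, if_pos hc]
              exact (ih rest hrest).1 (max (d - 1) 0)
            · simp only [pvBStep, if_neg ho, if_neg hc]
              simpa [pvBStep, ho, hc] using (ih rest hrest).1 d
      · intro d
        by_cases hb : c = '\\'
        · subst hb
          simp only [List.foldl_cons, pvAStep, pvSkipStr]
          cases rest with
          | nil => simp [pvStrip, pvSkipStr]
          | cons c2 r2 =>
            have hr2 : r2.length ≤ n := by simp at hl; omega
            simp only [List.foldl_cons, pvAStep, List.drop_succ_cons, List.drop_zero]
            exact (ih r2 hr2).2 d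
        · by_cases hq : c = '"'
          · subst hq
            simp only [List.foldl_cons, pvAStep, pvSkipStr]
            simpa using (ih rest hrest).1 d
          · simp only [List.foldl_cons, pvAStep, pvSkipStr, if_neg hb, if_neg hq]
            simpa [hb, hq] using (ih rest hrest).2 d

-- ===== VERDICT (by name: the statement is the Claim_ definition above) =====
theorem append_missing_braces_py_spec : Claim_equal_append_missing_braces_py := by
  intro text _
  unfold Spec_append_missing_braces_py append_missing_braces_py append_missing_braces_py_alt
  rw [(pv_main text.toList.length text.toList le_rfl).1 0]
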